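-- pv_equiv track=rewrite | github.com/jscoutinho/uerj | aed2/guloso_gap/caminhao.py | caminhao
-- ===== SOURCE A (Python) =====
-- def caminhao(itens, W):
--     caminhoes = []
--     itens.sort(reverse = True)
--     #[8,7,5,4,3,2,1]
--     while(len(itens)>0):
--         soma = 0
--         caminhao = []
--         i = 0
--         while(soma < W and i < len(itens)):
--             if W - soma >= itens[i]:
--                 soma += itens[i]
--                 caminhao.append(itens[i])
--                 itens.pop(i)
--             else:
--                 i += 1
--         caminhoes.append(caminhao)
--     return caminhoes
-- ===== SOURCE B (Python) =====
-- def caminhao(itens, W):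
--     # First-fit-decreasing in ONE pass over the sorted items: each item goes into the
--     # first truck that is still open (load < W) and has room, else opens a new truck.
--     # Equivalence is about the return value only (A sorts and empties `itens` in place).
--     trucks = []  # list of [load, items]
--     for x in sorted(itens, reverse=True):
--         for t in trucks:
--             if t[0] < W and W - t[0] >= x:
--                 t[0] += x
--                 t[1].append(x)
--                 break
--         else:
--             trucks.append([x, [x]])
--     return [t[1] for t in trucks]
-- ===== Notes on version B (the rewrite author's own statement) =====
-- stated objective: alternative
-- what changed: A fills one truck at a time by rescanning and pop()-ing the shrinking item list with index bookkeeping; B makes a single first-fit pass over the sorted items into a growing list of trucks (first open truck with room, else a new truck), with a proof that the two greedy disciplines pick identical trucks.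
import Mathlib
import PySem

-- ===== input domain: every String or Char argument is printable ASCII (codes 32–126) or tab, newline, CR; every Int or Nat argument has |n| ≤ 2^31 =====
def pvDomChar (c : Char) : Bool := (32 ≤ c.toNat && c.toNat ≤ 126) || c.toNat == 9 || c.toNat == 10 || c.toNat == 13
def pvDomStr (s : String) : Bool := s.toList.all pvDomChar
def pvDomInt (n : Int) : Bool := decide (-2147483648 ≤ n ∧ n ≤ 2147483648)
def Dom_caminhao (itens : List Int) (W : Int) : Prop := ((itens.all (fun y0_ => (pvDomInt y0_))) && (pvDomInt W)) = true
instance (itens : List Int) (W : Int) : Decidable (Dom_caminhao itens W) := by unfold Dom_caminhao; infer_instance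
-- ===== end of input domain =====

-- B replaces A's truck-at-a-time greedy (repeated scans of the shrinking item list, with index
-- bookkeeping and in-place pops) by a single first-fit pass over the sorted items into a growing
-- list of trucks.  Equivalence is about the RETURN value only: A sorts `itens` in place and pops
-- it empty, B leaves it untouched.

-- ===== PORT A =====
-- inner while loop: state (soma, caminhao, i, itens); pop(i) = eraseIdx (i < length holds here)
def caminhaoInner (W soma : Int) (truck : List Int) (i : Nat) (rem : List Int) :
    List Int × List Int :=
  if h : soma < W ∧ i < rem.length then
    let x := rem[i]'h.2
    if W - soma ≥ x then
      caminhaoInner W (soma + x) (truck ++ [x]) i (rem.eraseIdx i)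
    else
      caminhaoInner W soma truck (i + 1) rem
  else
    (truck, rem)
termination_by rem.length - i
decreasing_by
  · have := List.length_eraseIdx_of_lt h.2; omega
  · omega

-- outer while loop, with fuel: under Pre_ every round removes at least one item, so
-- itens.length + 1 rounds always suffice (outside Pre_ the Python loops forever).
def caminhaoOuter (W : Int) : Nat → List Int → List (List Int) → List (List Int)
  | 0, _, acc => acc.reverse
  | n + 1, rem, acc =>
    if 0 < rem.length then
      let p := caminhaoInner W 0 [] 0 rem
      caminhaoOuter W n p.2 (p.1 :: acc)
    else
      acc.reverse

def caminhao (itens : List Int) (W : Int) : List (List Int) :=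
  caminhaoOuter W (itens.length + 1) (PySem.List.sorted itens (fun x => x) true) []

-- ===== PORT B =====
-- place x into the first truck (load, items) with load < W and room for x, else open a new truck
def altPlace (W x : Int) : List (Int × List Int) → List (Int × List Int)
  | [] => [(x, [x])]
  | t :: ts =>
    if t.1 < W ∧ W - t.1 ≥ x then (t.1 + x, t.2 ++ [x]) :: ts
    else t :: altPlace W x ts

def caminhao_alt (itens : List Int) (W : Int) : List (List Int) :=
  (((PySem.List.sorted itens (fun x => x) true)).foldl
      (fun trucks x => altPlace W x trucks) []).map Prod.snd

-- ===== PRECONDITION & SPEC =====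
-- Pre_ is exactly A's termination domain: with a nonempty list, A's outer while loop runs forever
-- as soon as W ≤ 0 or some item exceeds W (an empty truck is appended and nothing is ever removed).
def Pre_caminhao (itens : List Int) (W : Int) : Prop :=
  itens = [] ∨ (0 < W ∧ ∀ x ∈ itens, x ≤ W)
instance (itens : List Int) (W : Int) : Decidable (Pre_caminhao itens W) := by
  unfold Pre_caminhao; infer_instance

def pvWitness_caminhao : List Int × Int := ([1, 8, 7, 4, 3, 2, 5], 10)

def Spec_caminhao (itens : List Int) (W : Int) (out : List (List Int)) : Prop :=
  out = caminhao_alt itens W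
instance (itens : List Int) (W : Int) (out : List (List Int)) : Decidable (Spec_caminhao itens W out) := by
  unfold Spec_caminhao; infer_instance

-- ===== CLAIM (what is proved, stated in full; the proofs are below) =====
def Claim_equal_caminhao : Prop := ∀ (itens : List Int) (W : Int), Dom_caminhao itens W → Pre_caminhao itens W → Spec_caminhao itens W (caminhao itens W)

-- ===== LEMMAS AND PROOFS =====

-- does some truck of T accept x?
def pvFits (W x : Int) (T : List (Int × List Int)) : Bool :=
  T.any fun t => decide (t.1 < W ∧ W - t.1 ≥ x)

-- residual of one FFD pass restricted to the trucks T (items that fit nowhere in T pass through)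
def pvSift (W : Int) : List (Int × List Int) → List Int → List (Int × List Int) × List Int
  | T, [] => (T, [])
  | T, x :: xs =>
    if pvFits W x T then pvSift W (altPlace W x T) xs
    else
      let p := pvSift W T xs
      (p.1, x :: p.2)

theorem altPlace_split (W x : Int) (T N : List (Int × List Int)) :
    altPlace W x (T ++ N) =
      if pvFits W x T then altPlace W x T ++ N else T ++ altPlace W x N := by
  induction T with
  | nil =>
    simp [pvFits]
  | cons t ts ih =>
    by_cases hfit : t.1 < W ∧ W - t.1 ≥ x
    · simp [pvFits, altPlace, hfit]
    · have : pvFits W x (t :: ts) = pvFits W x ts := by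
        simp [pvFits, hfit]
      simp only [List.cons_append, altPlace, if_neg hfit, this, ih]
      split <;> simp


theorem foldl_altPlace_split (W : Int) (rem : List Int) :
    ∀ (T N : List (Int × List Int)),
      rem.foldl (fun trucks x => altPlace W x trucks) (T ++ N) =
        (pvSift W T rem).1 ++ (pvSift W T rem).2.foldl (fun trucks x => altPlace W x trucks) N := by
  induction rem with
  | nil => intro T N; simp [pvSift]
  | cons x xs ih =>
    intro T N
    by_cases hfit : pvFits W x T
    · simp only [List.foldl_cons, altPlace_split, if_pos hfit, pvSift, ih]
    · simp only [List.foldl_cons, altPlace_split, if_neg hfit, pvSift, ih]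


theorem altPlace_length_of_fits (W x : Int) (T : List (Int × List Int))
    (h : pvFits W x T = true) : (altPlace W x T).length = T.length := by
  induction T with
  | nil => simp [pvFits] at h
  | cons t ts ih =>
    by_cases hf : t.1 < W ∧ W - t.1 ≥ x
    · simp [altPlace, hf]
    · have : pvFits W x ts = true := by
        simpa [pvFits, hf] using h
      simp [altPlace, hf, ih this]

theorem pvSift_fst_length (W : Int) (rem : List Int) :
    ∀ T, ((pvSift W T rem).1).length = T.length := by
  induction rem with
  | nil => intro T; simp [pvSift]
  | cons x xs ih =>
    intro T
    by_cases hfit : pvFits W x T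
    · simp [pvSift, hfit, ih, altPlace_length_of_fits W x T hfit]
    · simp [pvSift, hfit, ih]

theorem pvSift_snd_mem (W : Int) (rem : List Int) :
    ∀ T y, y ∈ (pvSift W T rem).2 → y ∈ rem := by
  induction rem with
  | nil => intro T y h; simp [pvSift] at h
  | cons x xs ih =>
    intro T y h
    by_cases hfit : pvFits W x T
    · simp only [pvSift, if_pos hfit] at h
      exact List.mem_cons_of_mem _ (ih _ _ h)
    · simp only [pvSift, if_neg hfit, List.mem_cons] at h
      rcases h with h | h
      · simp [h]
      · exact List.mem_cons_of_mem _ (ih _ _ h)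


theorem pvSift_snd_length (W : Int) (rem : List Int) :
    ∀ T, ((pvSift W T rem).2).length ≤ rem.length := by
  induction rem with
  | nil => intro T; simp [pvSift]
  | cons x xs ih =>
    intro T
    by_cases hfit : pvFits W x T
    · simp only [pvSift, if_pos hfit]
      exact Nat.le_succ_of_le (ih _)
    · simp only [pvSift, if_neg hfit, List.length_cons]
      exact Nat.succ_le_succ (ih _)


theorem pvSift_stuck (W soma : Int) (truck : List Int) (l : List Int) (h : ¬ soma < W) :
    pvSift W [(soma, truck)] l = ([(soma, truck)], l) := by
  induction l with
  | nil => simp [pvSift]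
  | cons x xs ih =>
    have : pvFits W x [(soma, truck)] = false := by simp [pvFits, h]
    simp [pvSift, this, ih]


-- the inner while loop is the single-truck sift of the unscanned suffix
theorem inner_eq_sift (W : Int) : ∀ (n : Nat) (rem : List Int) (i : Nat) (soma : Int) (truck : List Int),
    rem.length - i ≤ n → i ≤ rem.length →
    caminhaoInner W soma truck i rem =
      (((pvSift W [(soma, truck)] (rem.drop i)).1.headD (0, [])).2,
        rem.take i ++ (pvSift W [(soma, truck)] (rem.drop i)).2) := by
  intro n
  induction n with
  | zero =>
    intro rem i soma truck hn hi
    have hil : i = rem.length := by omega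
    rw [caminhaoInner]
    have hc : ¬ (soma < W ∧ i < rem.length) := by omega
    rw [dif_neg hc]
    simp [hil, pvSift]
  | succ n ih =>
    intro rem i soma truck hn hi
    rw [caminhaoInner]
    by_cases hc : soma < W ∧ i < rem.length
    · rw [dif_pos hc]
      have hx : rem.drop i = rem[i] :: rem.drop (i + 1) := List.drop_eq_getElem_cons hc.2
      have htl : (rem.take i).length = i := List.length_take_of_le hi
      by_cases hfit : W - soma ≥ rem[i]'hc.2
      · simp only [if_pos hfit]
        have herase : rem.eraseIdx i = rem.take i ++ rem.drop (i + 1) :=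
          List.eraseIdx_eq_take_drop_succ rem i
        have hlen : (rem.eraseIdx i).length = rem.length - 1 := List.length_eraseIdx_of_lt hc.2
        have h1 := ih (rem.eraseIdx i) i (soma + rem[i]'hc.2) (truck ++ [rem[i]'hc.2])
          (by omega) (by omega)
        rw [h1]
        have hdropE : (rem.eraseIdx i).drop i = rem.drop (i + 1) := by
          rw [herase, List.drop_append_of_le_length (by omega)]
          simp [List.drop_eq_nil_of_le (Nat.le_of_eq htl)]
        have htakeE : (rem.eraseIdx i).take i = rem.take i := by
          rw [herase, List.take_append_of_le_length (by omega)]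
          simp [List.take_take]
        have hfits : pvFits W (rem[i]'hc.2) [(soma, truck)] = true := by
          simp [pvFits]; exact ⟨hc.1, hfit⟩
        rw [hdropE, htakeE, hx]
        simp [pvSift, hfits, altPlace, hc.1, hfit]
      · simp only [if_neg hfit]
        have h1 := ih rem (i + 1) soma truck (by omega) (by omega)
        rw [h1]
        have hfits : pvFits W (rem[i]'hc.2) [(soma, truck)] = false := by
          simp [pvFits]; intro _; omega
        rw [hx]
        simp only [pvSift, hfits, Bool.false_eq_true, if_false]
        have htake : rem.take (i + 1) = rem.take i ++ [rem[i]'hc.2] :=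
          List.take_succ_eq_append_getElem hc.2
        rw [htake, List.append_assoc, List.singleton_append]
    · rw [dif_neg hc]
      rcases Decidable.em (i = rem.length) with hil | hil
      · simp [hil, pvSift]
      · have hsw : ¬ soma < W := by omega
        rw [pvSift_stuck W soma truck _ hsw]
        simp

theorem outer_eq_ffd (W : Int) (hW : 0 < W) :
    ∀ (n : Nat) (rem : List Int) (acc : List (List Int)),
      rem.length < n → (∀ x ∈ rem, x ≤ W) →
      caminhaoOuter W n rem acc =
        acc.reverse ++ (rem.foldl (fun trucks x => altPlace W x trucks) []).map Prod.snd := by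
  intro n
  induction n with
  | zero => intro rem acc hlen _; omega
  | succ n ih =>
    intro rem acc hlen hle
    match rem with
    | [] => rw [caminhaoOuter]; simp
    | x :: rest =>
      have hxW : x ≤ W := hle x (List.mem_cons_self)
      rw [caminhaoOuter]
      rw [if_pos (by simp)]
      have hstep : caminhaoInner W 0 [] 0 (x :: rest) = caminhaoInner W x [x] 0 rest := by
        rw [caminhaoInner]
        rw [dif_pos (by constructor <;> [exact hW; simp])]
        simp [hxW]
      have hinner := inner_eq_sift W rest.length rest 0 x [x] (by omega) (by omega)
      simp only [List.drop_zero] at hinner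
      obtain ⟨q, hq⟩ : ∃ q, (pvSift W [(x, [x])] rest).1 = [q] := by
        have := pvSift_fst_length W rest [(x, [x])]
        rcases List.length_eq_one_iff.mp (by simpa using this) with ⟨q, hq⟩
        exact ⟨q, hq⟩
      have hlen2 : (pvSift W [(x, [x])] rest).2.length < n := by
        have := pvSift_snd_length W rest [(x, [x])]
        simp at hlen
        omega
      have hle2 : ∀ y ∈ (pvSift W [(x, [x])] rest).2, y ≤ W := fun y hy =>
        hle y (List.mem_cons_of_mem _ (pvSift_snd_mem W rest _ y hy))
      have hih := ih (pvSift W [(x, [x])] rest).2 (q.2 :: acc) hlen2 hle2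
      have hfold : (x :: rest).foldl (fun trucks x => altPlace W x trucks) [] =
          (pvSift W [(x, [x])] rest).1 ++
            (pvSift W [(x, [x])] rest).2.foldl (fun trucks x => altPlace W x trucks) [] := by
        rw [List.foldl_cons]
        have : altPlace W x [] = [(x, [x])] ++ [] := by simp [altPlace]
        rw [this, foldl_altPlace_split]
      simp only [hstep, hinner, hq, List.headD_cons, List.take_zero, List.nil_append, hfold]
      rw [hih]
      simp


-- ===== VERDICT (by name: the statement is the Claim_ definition above) =====
theorem caminhao_spec : Claim_equal_caminhao := by
  intro itens W _ hpre
  unfold Spec_caminhao caminhao caminhao_alt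
  rcases hpre with h | ⟨hW, hle⟩
  · subst h
    rw [show PySem.List.sorted ([] : List Int) (fun x => x) true = [] from rfl]
    rw [caminhaoOuter]
    simp
  · have hlen : (PySem.List.sorted itens (fun x => x) true).length = itens.length :=
      PySem.List.length_sorted ..
    have hmem : ∀ x ∈ PySem.List.sorted itens (fun x => x) true, x ≤ W := fun x hx =>
      hle x ((PySem.List.mem_sorted ..).mp hx)
    rw [outer_eq_ffd W hW (itens.length + 1) _ [] (by omega) hmem]
    simp
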